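-- pv_equiv track=rewrite | github.com/hyo-jae-jung/programmers | 문자열_나누기.py | solution
-- ===== SOURCE A (Python) =====
-- from itertools import combinations as comb
--
-- def solution(s):
--     answer = []
--     k = 2
--
--     while len(s)>=2:
--         temp = []
--         # pdb.set_trace()
--         for i in set(s[:k]):
--             temp.append(s[:k].count(i))
--
--         for i,j in comb(temp,2):
--             if i==j:
--                 answer.append(s[:k])
--                 s = s[k:]
--                 k=2
--                 break
--         else:
--             k+=1
--     else:
--         answer.append(s)
--
--     return answer
-- ===== SOURCE B (Python) =====
-- def solution(s):
--     answer = []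
--     rest = s
--     while len(rest) >= 2:
--         counts = {}
--         end = None
--         for i, c in enumerate(rest):
--             counts[c] = counts.get(c, 0) + 1
--             vals = list(counts.values())
--             if len(set(vals)) < len(vals):
--                 end = i + 1
--                 break
--         if end is None:
--             # no prefix of rest has two characters with equal counts:
--             # the original would loop forever here (outside Pre_)
--             break
--         answer.append(rest[:end])
--         rest = rest[end:]
--     answer.append(rest)
--     return answer
-- ===== Notes on version B (the rewrite author's own statement) =====
-- stated objective: alternative
-- what changed: A regrows the candidate prefix and recomputes all character counts from scratch (set + str.count + pairwise combinations) for every candidate length; B makes one forward scan per chunk, updating a running counter dict incrementally and detecting a duplicate count value by comparing len(values) with len(set(values)).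
import Mathlib
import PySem

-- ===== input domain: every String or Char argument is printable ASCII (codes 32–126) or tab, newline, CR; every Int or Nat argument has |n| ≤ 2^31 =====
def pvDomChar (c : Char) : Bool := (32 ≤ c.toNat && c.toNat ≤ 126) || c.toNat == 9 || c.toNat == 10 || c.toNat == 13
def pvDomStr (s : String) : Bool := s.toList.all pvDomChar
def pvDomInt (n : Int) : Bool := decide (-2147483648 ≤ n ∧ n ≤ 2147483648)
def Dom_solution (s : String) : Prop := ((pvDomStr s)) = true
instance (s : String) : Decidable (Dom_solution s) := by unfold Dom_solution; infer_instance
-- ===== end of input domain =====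

-- B replaces A's per-length recount (set + str.count + combinations for every candidate
-- prefix length) by one forward scan per chunk with an incrementally updated counter dict.

-- ===== PORT A =====
-- 'for i,j in comb(temp,2): if i==j: … break / else: …' — true iff some pair of entries is equal
def pvCombEq : List Int → Bool
  | [] => false
  | x :: xs => xs.contains x || pvCombEq xs

-- 'temp = []; for i in set(s[:k]): temp.append(s[:k].count(i))' — the result of the pair test
-- does not depend on the set's (hash) iteration order, so first-insertion order is exact here
def pvTempA (p : List Char) : List Int :=
  (PySem.Set.ofList p).foldl (fun acc c => acc ++ [(PySem.List.count p c : Int)]) []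

-- A's while loop. On every input where the Python loop terminates it runs at most len(s)+1
-- iterations (a chunk of length L costs L-1 iterations, plus the final length check), so fuel
-- len(s)+1 is exact on Pre_; on inputs where the Python loops forever the fuel runs out.
def pvLoopA : Nat → List Char → Nat → List String → List String
  | 0, _, _, ans => ans
  | fuel+1, s, k, ans =>
    if 2 ≤ s.length then
      let pref := PySem.List.slice s none (some (k : Int))
      if pvCombEq (pvTempA pref) then
        pvLoopA fuel (PySem.List.slice s (some (k : Int)) none) 2 (ans ++ [String.ofList pref])
      else
        pvLoopA fuel s (k+1) ans
    else
      ans ++ [String.ofList s]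

def solution (s : String) : List String := pvLoopA (s.toList.length + 1) s.toList 2 []

-- ===== PORT B =====
-- inner 'for i, c in enumerate(rest): … break' of Source B; returns end (i+1) or None
def pvScanB : List Char → Nat → PySem.Dict Char Int → Option Nat
  | [], _, _ => none
  | c :: rest, i, counts =>
    let counts' := counts.insert c (counts.getD c 0 + 1)
    let vals := counts'.values
    if (PySem.Set.ofList vals).length < vals.length then some (i+1)
    else pvScanB rest (i+1) counts'

-- termination of the outer loop: a found end is past the scan's start index
theorem pvScanB_lt : ∀ (l : List Char) (i : Nat) (d : PySem.Dict Char Int) (e : Nat),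
    pvScanB l i d = some e → i < e := by
  intro l
  induction l with
  | nil => intro i d e h; simp [pvScanB] at h
  | cons c rest ih =>
    intro i d e h
    simp only [pvScanB] at h
    split at h
    · simp at h; omega
    · have := ih (i+1) _ e h; omega

-- outer 'while len(rest) >= 2' of Source B
def pvLoopB (rest : List Char) : List String :=
  if h2 : 2 ≤ rest.length then
    match hs : pvScanB rest 0 PySem.Dict.empty with
    | some e =>
        String.ofList (PySem.List.slice rest none (some (e : Int)))
          :: pvLoopB (PySem.List.slice rest (some (e : Int)) none)
    | none => [String.ofList rest]
  else [String.ofList rest]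
termination_by rest.length
decreasing_by
  rw [PySem.List.slice_from rest (by positivity)]
  have := pvScanB_lt rest 0 PySem.Dict.empty e hs
  simp [List.length_drop]; omega

def solution_alt (s : String) : List String := pvLoopB s.toList

-- ===== PRECONDITION & SPEC =====
-- 'prefix p has two distinct characters with equal counts'
def pvTie (p : List Char) : Bool :=
  !decide (((PySem.Set.ofList p).map (fun c => (List.count c p : Int))).Nodup)

-- search loop behind pvChunkGo, structural on the remaining number of candidate lengths
def pvChunkGoAux (r : List Char) : Nat → Nat → Option Nat
  | 0, _ => none
  | gas+1, k => if pvTie (r.take k) then some k else pvChunkGoAux r gas (k+1)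

-- least k' ≥ k (up to r.length) whose prefix has a tie; none if no prefix of r has one
def pvChunkGo (r : List Char) (k : Nat) : Option Nat := pvChunkGoAux r (r.length + 1 - k) k

-- chunk-by-chunk check behind pvPre, structural on a step counter
def pvPreAux : Nat → List Char → Bool
  | 0, r => decide (r.length < 2)
  | gas+1, r =>
    if 2 ≤ r.length then
      match pvChunkGo r 2 with
      | some K => pvPreAux gas (r.drop K)
      | none => false
    else true

-- A's while loop does not terminate on every input: e.g. on "aa" no prefix of the remainder
-- ever acquires two characters with equal counts and A loops forever. Pre_solution is exactly
-- the halting set of that loop: the greedy chunking (each chunk = shortest prefix with two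
-- equal character counts) consumes the string down to fewer than 2 characters. This set is
-- inherently recursive — no bound/shape formula over s describes it — so pvPre states it as
-- the chunk-by-chunk condition on prefix character counts; it computes neither port's output
-- and excludes no input on which the Python A returns (coverage is 100%).
def pvPre (r : List Char) : Bool := pvPreAux r.length r

def Pre_solution (s : String) : Prop := pvPre s.toList = true
instance (s : String) : Decidable (Pre_solution s) := by unfold Pre_solution; infer_instance

def pvWitness_solution : String := "abab"

def Spec_solution (s : String) (out : List String) : Prop := out = solution_alt s
instance (s : String) (out : List String) : Decidable (Spec_solution s out) := by
  unfold Spec_solution; infer_instance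

-- ===== CLAIM (what is proved, stated in full; the proofs are below) =====
def Claim_equal_solution : Prop :=
  ∀ (s : String), Dom_solution s → Pre_solution s → Spec_solution s (solution s)

-- ===== LEMMAS AND PROOFS =====

theorem pvChunkGoAux_bounds (r : List Char) : ∀ (gas k K : Nat),
    pvChunkGoAux r gas k = some K → k ≤ K ∧ K < gas + k := by
  intro gas
  induction gas with
  | zero => intro k K h; simp [pvChunkGoAux] at h
  | succ g ih =>
    intro k K h
    rw [pvChunkGoAux] at h
    split at h
    · simp at h; omega
    · have := ih (k+1) K h; omega

-- bounds of a found chunk length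
theorem pvChunkGo_bounds : ∀ (r : List Char) (k K : Nat),
    pvChunkGo r k = some K → k ≤ K ∧ K ≤ r.length := by
  intro r k K h
  unfold pvChunkGo at h
  by_cases hlt : r.length < k
  · have : r.length + 1 - k = 0 := by omega
    rw [this] at h; simp [pvChunkGoAux] at h
  · have := pvChunkGoAux_bounds r (r.length + 1 - k) k K h
    omega

-- the one-step unfolding pvChunkGo would have as a well-founded recursion
theorem pvChunkGo_eq (r : List Char) (k : Nat) :
    pvChunkGo r k = if r.length < k then none
      else if pvTie (List.take k r) then some k else pvChunkGo r (k+1) := by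
  unfold pvChunkGo
  by_cases hlt : r.length < k
  · have h0 : r.length + 1 - k = 0 := by omega
    rw [h0, if_pos hlt]; rfl
  · have h1 : r.length + 1 - k = (r.length + 1 - (k+1)) + 1 := by omega
    rw [h1, if_neg hlt, pvChunkGoAux]

theorem pvPreAux_congr : ∀ (gas gas' : Nat) (r : List Char), r.length ≤ gas → r.length ≤ gas' →
    pvPreAux gas r = pvPreAux gas' r := by
  intro gas
  induction gas with
  | zero =>
    intro gas' r hg hg'
    have : r.length = 0 := by omega
    cases gas' with
    | zero => rfl
    | succ g' =>
      rw [pvPreAux, pvPreAux, if_neg (by omega)]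
      simp; omega
  | succ g ih =>
    intro gas' r hg hg'
    cases gas' with
    | zero =>
      have : r.length = 0 := by omega
      rw [pvPreAux, pvPreAux, if_neg (by omega)]
      simp; omega
    | succ g' =>
      rw [pvPreAux, pvPreAux]
      by_cases h2 : 2 ≤ r.length
      · rw [if_pos h2, if_pos h2]
        cases hK : pvChunkGo r 2 with
        | none => rfl
        | some K =>
          have hb := pvChunkGo_bounds r 2 K hK
          exact ih g' (r.drop K) (by simp; omega) (by simp; omega)
      · rw [if_neg h2, if_neg h2]

-- the one-step unfolding pvPre would have as a well-founded recursion
theorem pvPre_eq (r : List Char) :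
    pvPre r = if 2 ≤ r.length then
      (match pvChunkGo r 2 with
       | some K => pvPre (r.drop K)
       | none => false)
    else true := by
  unfold pvPre
  by_cases h2 : 2 ≤ r.length
  · have h1 : r.length = (r.length - 1) + 1 := by omega
    rw [if_pos h2, h1, pvPreAux, if_pos h2]
    cases hK : pvChunkGo r 2 with
    | none => rfl
    | some K =>
      have hb := pvChunkGo_bounds r 2 K hK
      exact pvPreAux_congr (r.length - 1) (r.drop K).length (r.drop K) (by simp; omega) (le_refl _)
  · have hval : pvPreAux r.length r = true := by
      have h0 : r.length = 0 ∨ r.length = 1 := by omega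
      rcases h0 with h0 | h0 <;> rw [h0, pvPreAux]
      · simp; omega
      · rw [if_neg h2]
    rw [if_neg h2, hval]

-- the pairwise-equality test of A is exactly 'not all entries distinct'
theorem pvCombEq_iff : ∀ xs : List Int, pvCombEq xs = true ↔ ¬ xs.Nodup := by
  intro xs
  induction xs with
  | nil => simp [pvCombEq]
  | cons x t ih => simp [pvCombEq, ih, List.nodup_cons]; tauto

theorem foldl_add_len_le (xs : List Int) : ∀ s : PySem.Set Int,
    (xs.foldl PySem.Set.add s).length ≤ s.length + xs.length := by
  induction xs with
  | nil => simp
  | cons x t ih =>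
    intro s
    simp only [List.foldl_cons]
    have h := ih (PySem.Set.add s x)
    by_cases hc : x ∈ s
    · simp [PySem.Set.add, PySem.Set.contains, hc] at h ⊢; omega
    · simp [PySem.Set.add, PySem.Set.contains, hc] at h ⊢; omega

theorem foldl_add_len_lt (xs : List Int) : ∀ s : PySem.Set Int,
    (¬ xs.Nodup ∨ ∃ y ∈ xs, y ∈ s) →
    (xs.foldl PySem.Set.add s).length < s.length + xs.length := by
  induction xs with
  | nil => intro s h; simp at h
  | cons x t ih =>
    intro s h
    simp only [List.foldl_cons]
    by_cases hc : x ∈ s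
    · have := foldl_add_len_le t (PySem.Set.add s x)
      simp [PySem.Set.add, PySem.Set.contains, hc] at this ⊢
      omega
    · have hrec : ¬ t.Nodup ∨ ∃ y ∈ t, y ∈ PySem.Set.add s x := by
        rcases h with h | ⟨y, hy, hys⟩
        · rw [List.nodup_cons] at h
          by_cases hx : x ∈ t
          · exact Or.inr ⟨x, hx, by simp [PySem.Set.add, PySem.Set.contains, hc]⟩
          · exact Or.inl (by tauto)
        · rcases List.mem_cons.mp hy with rfl | hy
          · exact absurd hys hc
          · exact Or.inr ⟨y, hy, by simp [PySem.Set.add, PySem.Set.contains, hc, hys]⟩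
      have := ih (PySem.Set.add s x) hrec
      simp [PySem.Set.add, PySem.Set.contains, hc] at this ⊢
      omega

theorem foldl_add_eq_of_nodup (xs : List Int) : ∀ s : PySem.Set Int,
    xs.Nodup → (∀ y ∈ xs, y ∉ s) → xs.foldl PySem.Set.add s = s ++ xs := by
  induction xs with
  | nil => simp
  | cons x t ih =>
    intro s hnd hdisj
    rw [List.nodup_cons] at hnd
    simp only [List.foldl_cons]
    have hc : x ∉ s := hdisj x (by simp)
    have hadd : PySem.Set.add s x = s ++ [x] := by
      simp [PySem.Set.add, PySem.Set.contains, hc]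
    rw [hadd, ih (s ++ [x]) hnd.2]
    · simp
    · intro y hy
      simp only [List.mem_append, List.mem_singleton]
      rintro (hys | rfl)
      · exact hdisj y (by simp [hy]) hys
      · exact hnd.1 hy

-- 'len(set(vals)) < len(vals)' is exactly 'vals has a duplicate'
theorem setlen_iff (xs : List Int) :
    ((PySem.Set.ofList xs).length < xs.length) ↔ ¬ xs.Nodup := by
  constructor
  · intro h hnd
    have := foldl_add_eq_of_nodup xs [] hnd (by simp)
    rw [PySem.Set.ofList_eq_foldl] at h
    simp [this] at h
  · intro h
    have := foldl_add_len_lt xs [] (Or.inl h)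
    rw [PySem.Set.ofList_eq_foldl]
    simpa using this

theorem tempA_eq (p : List Char) :
    pvTempA p = (PySem.Set.ofList p).map (fun c => (List.count c p : Int)) := by
  unfold pvTempA
  rw [PySem.List.foldl_append_singleton_eq_map]
  simp [PySem.List.count]

theorem combEq_tempA (p : List Char) : pvCombEq (pvTempA p) = pvTie p := by
  rw [Bool.eq_iff_iff, pvCombEq_iff, tempA_eq, pvTie]
  simp

theorem counterStep (pre : List Char) (c : Char) :
    (PySem.Dict.counter pre).insert c ((PySem.Dict.counter pre).getD c 0 + 1)
      = PySem.Dict.counter (pre ++ [c]) := by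
  rw [← PySem.Dict.foldl_insert_getD_add_one_eq_counter,
      ← PySem.Dict.foldl_insert_getD_add_one_eq_counter, List.foldl_append]
  simp

theorem counterVals (p : List Char) :
    (PySem.Dict.counter p : PySem.Dict Char Int).values
      = (PySem.Set.ofList p).map (fun c => (List.count c p : Int)) := by
  have h : (PySem.Dict.counter p : PySem.Dict Char Int).values
      = (PySem.Dict.counter p : PySem.Dict Char Int).items.map Prod.snd := rfl
  rw [h, PySem.Dict.items_counter]
  simp

theorem scanCond (p : List Char) :
    (((PySem.Set.ofList ((PySem.Dict.counter p : PySem.Dict Char Int).values)).length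
        < (PySem.Dict.counter p : PySem.Dict Char Int).values.length) ↔ pvTie p = true) := by
  rw [counterVals, setlen_iff, pvTie]
  simp

theorem pvChunkGoAux_elim (r : List Char) : ∀ (gas k K : Nat), pvChunkGoAux r gas k = some K →
    pvTie (List.take K r) = true ∧ ∀ j, k ≤ j → j < K → pvTie (List.take j r) = false := by
  intro gas
  induction gas with
  | zero => intro k K h; simp [pvChunkGoAux] at h
  | succ g ih =>
    intro k K hK
    rw [pvChunkGoAux] at hK
    split at hK
    next ht => simp at hK; subst hK; exact ⟨ht, fun j h1 h2 => by omega⟩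
    next ht =>
      obtain ⟨h1, h2⟩ := ih (k+1) K hK
      refine ⟨h1, fun j hj1 hj2 => ?_⟩
      rcases Nat.eq_or_lt_of_le hj1 with rfl | hlt
      · simpa using ht
      · exact h2 j hlt hj2

theorem pvChunkGo_elim : ∀ (r : List Char) (k K : Nat), pvChunkGo r k = some K →
    pvTie (List.take K r) = true ∧ ∀ j, k ≤ j → j < K → pvTie (List.take j r) = false := by
  intro r k K hK
  exact pvChunkGoAux_elim r (r.length + 1 - k) k K hK

theorem scan_eq : ∀ (l pre : List Char),
    pvScanB l pre.length (PySem.Dict.counter pre) = pvChunkGo (pre ++ l) (pre.length + 1) := by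
  intro l
  induction l with
  | nil =>
    intro pre
    rw [pvChunkGo_eq]
    simp [pvScanB]
  | cons c rest ih =>
    intro pre
    rw [pvChunkGo_eq]
    have hlen : (pre ++ c :: rest).length = pre.length + 1 + rest.length := by simp; omega
    have hnlt : ¬ (pre ++ c :: rest).length < pre.length + 1 := by omega
    have htake : (pre ++ c :: rest).take (pre.length + 1) = pre ++ [c] := by
      have h : pre ++ c :: rest = (pre ++ [c]) ++ rest := by simp
      rw [h, List.take_left']
      simp
    simp only [hnlt, if_false, htake]
    simp only [pvScanB, counterStep]
    rw [if_congr (scanCond (pre ++ [c])) rfl rfl]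
    by_cases hc : pvTie (pre ++ [c]) = true
    · rw [if_pos hc, if_pos hc]
    · rw [if_neg hc, if_neg hc]
      have h1 : pre.length + 1 = (pre ++ [c]).length := by simp
      rw [h1, ih (pre ++ [c])]
      simp

theorem tie_one (r : List Char) : pvTie (List.take 1 r) = false := by
  cases r with
  | nil => decide
  | cons a t =>
    simp [pvTie, PySem.Set.ofList, PySem.Set.add, PySem.Set.contains]

theorem chunkGo_one_eq_two (r : List Char) (h2 : 2 ≤ r.length) :
    pvChunkGo r 1 = pvChunkGo r 2 := by
  rw [pvChunkGo_eq]
  have h : ¬ r.length < 1 := by omega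
  simp [h, tie_one]

theorem scan_top (r : List Char) (h2 : 2 ≤ r.length) :
    pvScanB r 0 PySem.Dict.empty = pvChunkGo r 2 := by
  rw [← chunkGo_one_eq_two r h2]
  have := scan_eq r []
  simpa [PySem.Dict.counter] using this

theorem slice_take (xs : List Char) (k : Nat) :
    PySem.List.slice xs none (some (k : Int)) = xs.take k := by
  rw [PySem.List.slice_to xs (by positivity)]; simp

theorem slice_drop (xs : List Char) (k : Nat) :
    PySem.List.slice xs (some (k : Int)) none = xs.drop k := by
  rw [PySem.List.slice_from xs (by positivity)]; simp

theorem loopA_chunk (r : List Char) (h2 : 2 ≤ r.length) :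
    ∀ (j k : Nat), 2 ≤ k → pvChunkGo r k = some (k + j) →
    ∀ (fuel : Nat) (ans : List String),
      pvLoopA (fuel + j + 1) r k ans
        = pvLoopA fuel (r.drop (k + j)) 2 (ans ++ [String.ofList (r.take (k + j))]) := by
  intro j
  induction j with
  | zero =>
    intro k hk2 hK fuel ans
    have htie : pvTie (r.take k) = true := by simpa using (pvChunkGo_elim r k (k + 0) hK).1
    show pvLoopA (fuel + 1) r k ans = _
    conv_lhs => rw [pvLoopA]
    simp only [slice_take, slice_drop, combEq_tempA]
    rw [if_pos h2, if_pos htie]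
    simp
  | succ j ih =>
    intro k hk2 hK fuel ans
    have hb := pvChunkGo_bounds r k (k + (j + 1)) hK
    have hfalse : pvTie (r.take k) = false :=
      (pvChunkGo_elim r k (k + (j + 1)) hK).2 k (le_refl k) (by omega)
    have heq : fuel + (j + 1) + 1 = (fuel + j + 1) + 1 := by omega
    rw [heq]
    show pvLoopA ((fuel + j + 1) + 1) r k ans = _
    conv_lhs => rw [pvLoopA]
    simp only [slice_take, slice_drop, combEq_tempA]
    rw [if_pos h2, if_neg (by simp [hfalse])]
    have hK' : pvChunkGo r (k + 1) = some ((k + 1) + j) := by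
      rw [pvChunkGo_eq] at hK
      have hn : ¬ r.length < k := by omega
      simp [hn, hfalse] at hK
      rw [hK]; congr 1; omega
    have hres := ih (k + 1) (by omega) hK' fuel ans
    have hidx : (k + 1) + j = k + (j + 1) := by omega
    rw [hidx] at hres
    exact hres

theorem main_lemma : ∀ (n : Nat) (r : List Char), r.length ≤ n → pvPre r = true →
    ∀ (ans : List String) (fuel : Nat), r.length + 1 ≤ fuel →
      pvLoopA fuel r 2 ans = ans ++ pvLoopB r := by
  intro n
  induction n with
  | zero =>
    intro r hlen hpre ans fuel hfuel
    have hr : r = [] := List.eq_nil_of_length_eq_zero (by omega)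
    subst hr
    cases fuel with
    | zero => omega
    | succ f =>
      conv_lhs => rw [pvLoopA]
      rw [pvLoopB]
      simp
  | succ n ih =>
    intro r hlen hpre ans fuel hfuel
    by_cases h2 : 2 ≤ r.length
    · rw [pvPre_eq, if_pos h2] at hpre
      split at hpre
      case h_2 => exact absurd hpre (by simp)
      case h_1 K hK =>
        have hb := pvChunkGo_bounds r 2 K hK
        have hKj : pvChunkGo r 2 = some (2 + (K - 2)) := by rw [hK]; congr 1; omega
        have hfe : fuel = (fuel - (K - 1)) + (K - 2) + 1 := by omega
        rw [hfe, loopA_chunk r h2 (K - 2) 2 (le_refl 2) hKj (fuel - (K - 1)) ans]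
        have h2K : 2 + (K - 2) = K := by omega
        rw [h2K]
        have hlen' : (r.drop K).length ≤ n := by simp; omega
        have hfuel' : (r.drop K).length + 1 ≤ fuel - (K - 1) := by simp; omega
        rw [ih (r.drop K) hlen' hpre (ans ++ [String.ofList (r.take K)]) (fuel - (K - 1)) hfuel']
        have hscan : pvScanB r 0 PySem.Dict.empty = some K := (scan_top r h2).trans hK
        conv_rhs => rw [pvLoopB]
        rw [dif_pos h2]
        simp only [slice_take, slice_drop]
        split
        next e hs =>
          have he : e = K := by rw [hs] at hscan; exact Option.some.inj hscan
          subst he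
          simp
        next hs => rw [hs] at hscan; cases hscan
    · cases fuel with
      | zero => omega
      | succ f =>
        conv_lhs => rw [pvLoopA]
        rw [pvLoopB, if_neg h2, dif_neg h2]

-- ===== VERDICT (by name: the statement is the Claim_ definition above) =====
theorem solution_spec : Claim_equal_solution := by
  intro s _ hpre
  unfold Spec_solution solution solution_alt
  have := main_lemma s.toList.length s.toList (le_refl _) hpre [] (s.toList.length + 1) (le_refl _)
  simpa using this
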